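-- pv_equiv track=rewrite | github.com/intel/Speech-to-Text-Analytics-System | asr/utils.py | get_switches_per_conversation
-- ===== SOURCE A (Python) =====
-- def get_switches_per_conversation(diarization_results):
--     """
--     Calucates the swithces in conversation.
--     """
--
--     index = 0
--     prev_spk = None
--     switch = 0
--     for segment in diarization_results:
--         if index > 0:
--             if prev_spk != segment["speaker"]:
--                 switch += 1
--         prev_spk = segment["speaker"]
--         index += 1
--     return switch
-- ===== SOURCE B (Python) =====
-- def get_switches_per_conversation(diarization_results):
--     # A speaker switch happens exactly at each boundary between two consecutive
--     # runs of the same speaker, so switches = (number of runs) - 1 (0 if empty).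
--     def runs(xs):
--         # run-length compression (keep one representative per consecutive run)
--         if not xs:
--             return []
--         rest = runs(xs[1:])
--         if rest and rest[0] == xs[0]:
--             return rest
--         return [xs[0]] + rest
--
--     speakers = [seg["speaker"] for seg in diarization_results]
--     return max(len(runs(speakers)) - 1, 0)
-- ===== Notes on version B (the rewrite author's own statement) =====
-- stated objective: alternative
-- what changed: Instead of A's single-pass index/prev_spk counting loop, B recursively run-length-compresses the speaker sequence into one representative per consecutive run and returns the number of runs minus one (floored at 0).
import Mathlib
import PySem

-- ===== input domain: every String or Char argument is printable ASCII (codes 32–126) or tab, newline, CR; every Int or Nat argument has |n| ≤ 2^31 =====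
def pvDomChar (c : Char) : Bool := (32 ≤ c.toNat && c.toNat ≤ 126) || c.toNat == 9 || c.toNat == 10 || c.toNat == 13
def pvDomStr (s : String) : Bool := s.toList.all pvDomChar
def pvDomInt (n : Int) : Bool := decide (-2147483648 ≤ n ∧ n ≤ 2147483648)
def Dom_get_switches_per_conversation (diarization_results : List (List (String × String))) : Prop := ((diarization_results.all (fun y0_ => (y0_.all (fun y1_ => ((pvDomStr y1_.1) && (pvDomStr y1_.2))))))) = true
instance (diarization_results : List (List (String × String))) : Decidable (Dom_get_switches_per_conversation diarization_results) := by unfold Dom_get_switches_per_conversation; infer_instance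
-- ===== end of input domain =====

-- B replaces A's index/prev_spk counting loop by a different algorithm: recursively
-- run-length-compress the speaker sequence and return (number of runs) - 1, floored at 0.

-- segment["speaker"]: first-match lookup in the association list (Pre_ guarantees the key exists)
def pvSpeaker (seg : List (String × String)) : String :=
  (((seg.find? (fun kv => kv.1 == "speaker")).map (·.2)).getD "")

-- ===== PORT A =====
-- loop body of A on state (index, prev_spk, switch); prev_spk : Option String (starts as None)
def pvStepA (st : Int × Option String × Int) (s : String) : Int × Option String × Int :=
  (st.1 + 1, some s,
   if st.1 > 0 ∧ st.2.1 ≠ some s then st.2.2 + 1 else st.2.2)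

def get_switches_per_conversation (diarization_results : List (List (String × String))) : Int :=
  (diarization_results.foldl (fun st segment => pvStepA st (pvSpeaker segment)) (0, none, 0)).2.2

-- ===== PORT B =====
-- Source B's `runs`: recursive run-length compression, keeping one representative per run
def pvRuns : List String → List String
  | [] => []
  | a :: t =>
    let rest := pvRuns t
    if rest.head? == some a then rest else a :: rest

def get_switches_per_conversation_alt (diarization_results : List (List (String × String))) : Int :=
  let speakers := diarization_results.map pvSpeaker
  max ((Int.ofNat (pvRuns speakers).length) - 1) 0

-- ===== PRECONDITION & SPEC =====
-- Pre_: every segment dict has a "speaker" key; on a segment without it A raises KeyError.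
def Pre_get_switches_per_conversation (diarization_results : List (List (String × String))) : Prop :=
  ∀ seg ∈ diarization_results, (seg.find? (fun kv => kv.1 == "speaker")).isSome

instance (diarization_results : List (List (String × String))) : Decidable (Pre_get_switches_per_conversation diarization_results) := by unfold Pre_get_switches_per_conversation; infer_instance

def pvWitness_get_switches_per_conversation : (List (List (String × String))) :=
  [[("speaker", "A")], [("speaker", "B")], [("speaker", "B")]]

def Spec_get_switches_per_conversation (diarization_results : List (List (String × String))) (out : Int) : Prop := out = get_switches_per_conversation_alt diarization_results
instance (diarization_results : List (List (String × String))) (out : Int) : Decidable (Spec_get_switches_per_conversation diarization_results out) := by unfold Spec_get_switches_per_conversation; infer_instance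

-- ===== CLAIM (what is proved, stated in full; the proofs are below) =====
def Claim_equal_get_switches_per_conversation : Prop := ∀ (diarization_results : List (List (String × String))), Dom_get_switches_per_conversation diarization_results → Pre_get_switches_per_conversation diarization_results → Spec_get_switches_per_conversation diarization_results (get_switches_per_conversation diarization_results)

-- ===== LEMMAS AND PROOFS =====

theorem pvRuns_head (a : String) (t : List String) : (pvRuns (a :: t)).head? = some a := by
  simp only [pvRuns]
  cases h : (pvRuns t).head? == some a with
  | true => simpa using (beq_iff_eq.mp h)
  | false => simp

-- A's loop, started after the first element, computes (runs of prev::rest) - 1 more switches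
theorem pvRuns_cons_cons (p a : String) (t : List String) :
    pvRuns (p :: a :: t) = if p = a then pvRuns (a :: t) else p :: pvRuns (a :: t) := by
  rw [show pvRuns (p :: a :: t) =
      (if (pvRuns (a :: t)).head? == some p then pvRuns (a :: t)
       else p :: pvRuns (a :: t)) from rfl]
  rw [pvRuns_head]
  by_cases h : p = a
  · rw [if_pos (by simp [h]), if_pos h]
  · rw [if_neg (by simp; exact fun e => h e.symm), if_neg h]

theorem pvLoopA (l : List String) :
    ∀ (p : String) (i sw : Int), 0 < i →
      (l.foldl pvStepA (i, some p, sw)).2.2 = sw + Int.ofNat (pvRuns (p :: l)).length - 1 := by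
  induction l with
  | nil => intro p i sw _; simp [pvRuns]
  | cons a t ih =>
    intro p i sw hi
    simp only [List.foldl_cons, pvStepA]
    rw [ih a (i + 1) _ (by omega)]
    have hlen : (pvRuns (p :: a :: t)).length =
        if p = a then (pvRuns (a :: t)).length else (pvRuns (a :: t)).length + 1 := by
      rw [pvRuns_cons_cons]
      by_cases h : p = a <;> simp [h]
    rw [hlen]
    simp only [Int.ofNat_eq_natCast]
    by_cases hpa : p = a
    · rw [if_pos hpa, if_neg (by simp [hpa])]
    · rw [if_neg hpa, if_pos ⟨hi, by simpa using hpa⟩]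
      push_cast
      ring

-- ===== VERDICT (by name: the statement is the Claim_ definition above) =====
theorem get_switches_per_conversation_spec : Claim_equal_get_switches_per_conversation := by
  intro xs _ _
  unfold Spec_get_switches_per_conversation get_switches_per_conversation
    get_switches_per_conversation_alt
  rw [← List.foldl_map (f := pvSpeaker) (g := pvStepA)]
  cases h : xs.map pvSpeaker with
  | nil => simp [pvRuns]
  | cons a t =>
    simp only [List.foldl_cons, pvStepA]
    norm_num
    rw [pvLoopA t a 1 0 (by omega)]
    have h1 : 1 ≤ (pvRuns (a :: t)).length := by
      cases hr : pvRuns (a :: t) with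
      | nil => exact absurd (pvRuns_head a t) (by simp [hr])
      | cons _ _ => simp
    simp only [Int.ofNat_eq_natCast]
    omega
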